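-- pv_equiv track=rewrite | github.com/IVIacqueen/SudokuSolver | SudokuSolver.py | check_valid_section
-- ===== SOURCE A (Python) =====
-- EMPTY_VALUE = "."
--
-- def check_valid_section(section):
--     count = 0
--     unique_digits = set(section)
--     unique_digits.discard(EMPTY_VALUE)
--
--     for digit in section:
--         if (digit != EMPTY_VALUE):
--             count += 1
--
--     return (len(unique_digits)) == count
-- ===== SOURCE B (Python) =====
-- EMPTY_VALUE = "."
--
-- def check_valid_section(section):
--     seen = set()
--     for digit in section:
--         if digit == EMPTY_VALUE:
--             continue
--         if digit in seen:
--             return False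
--         seen.add(digit)
--     return True
-- ===== Notes on version B (the rewrite author's own statement) =====
-- stated objective: simpler
-- what changed: Single pass with a seen-set and early exit on the first repeated non-empty entry, instead of building the full set, discarding EMPTY_VALUE, counting non-empties in a second pass and comparing lengths.
import Mathlib
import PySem

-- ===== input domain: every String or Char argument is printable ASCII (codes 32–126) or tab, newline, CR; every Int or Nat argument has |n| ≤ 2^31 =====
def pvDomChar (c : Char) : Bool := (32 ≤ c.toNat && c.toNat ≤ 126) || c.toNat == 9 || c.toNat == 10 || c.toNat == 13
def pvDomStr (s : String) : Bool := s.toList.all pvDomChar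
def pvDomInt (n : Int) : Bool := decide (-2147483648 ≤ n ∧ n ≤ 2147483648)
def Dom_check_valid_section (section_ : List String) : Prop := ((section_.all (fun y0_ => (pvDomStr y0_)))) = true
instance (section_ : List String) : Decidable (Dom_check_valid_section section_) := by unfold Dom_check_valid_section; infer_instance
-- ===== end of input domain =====

-- B replaces A's two-phase "build set, discard EMPTY, count non-empties, compare lengths"
-- with a single pass over the section keeping a seen-set and returning False at the first
-- repeated non-empty entry (objective: simpler).


def EMPTY_VALUE : String := "."

-- ===== PORT A =====
def check_valid_section (section_ : List String) : Bool :=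
  let count : Int := 0
  let unique_digits : PySem.Set String := PySem.Set.ofList section_
  let unique_digits := PySem.Set.discard unique_digits EMPTY_VALUE
  let count := section_.foldl (fun count digit => if digit ≠ EMPTY_VALUE then count + 1 else count) count
  PySem.Set.len unique_digits == count

-- ===== PORT B =====
-- the 'for digit in section' loop of Source B, with early return on a repeated non-empty entry
def check_valid_section_alt_loop (seen : PySem.Set String) : List String → Bool
  | [] => true
  | digit :: rest =>
    if digit = EMPTY_VALUE then check_valid_section_alt_loop seen rest
    else if PySem.Set.contains seen digit then false
    else check_valid_section_alt_loop (PySem.Set.add seen digit) rest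

def check_valid_section_alt (section_ : List String) : Bool :=
  check_valid_section_alt_loop PySem.Set.empty section_

-- ===== PRECONDITION & SPEC =====
def Spec_check_valid_section (section_ : List String) (out : Bool) : Prop := out = check_valid_section_alt section_
instance (section_ : List String) (out : Bool) : Decidable (Spec_check_valid_section section_ out) := by unfold Spec_check_valid_section; infer_instance

-- ===== CLAIM (what is proved, stated in full; the proofs are below) =====
def Claim_equal_check_valid_section : Prop := ∀ (section_ : List String), Dom_check_valid_section section_ → Spec_check_valid_section section_ (check_valid_section section_)

-- ===== LEMMAS AND PROOFS =====

-- the non-empty entries of the section, in order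
def pvNE (section_ : List String) : List String := section_.filter (fun d => d ≠ EMPTY_VALUE)

theorem pvNE_cons_pos {d : String} {t : List String} (h : ¬ d = EMPTY_VALUE) :
    pvNE (d :: t) = d :: pvNE t := by simp [pvNE, List.filter, h]

theorem pvNE_cons_neg {d : String} {t : List String} (h : d = EMPTY_VALUE) :
    pvNE (d :: t) = pvNE t := by simp [pvNE, List.filter, h]

theorem pv_add_mem {acc : List String} {x : String} (h : x ∈ acc) :
    PySem.Set.add acc x = acc := by
  simp [PySem.Set.add, PySem.Set.contains, h]

theorem pv_add_not_mem {acc : List String} {x : String} (h : x ∉ acc) :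
    PySem.Set.add acc x = acc ++ [x] := by
  simp [PySem.Set.add, PySem.Set.contains, h]

-- A's counting loop counts the non-empty entries
theorem pv_count (s : List String) : ∀ (c : Int),
    s.foldl (fun count digit => if digit ≠ EMPTY_VALUE then count + 1 else count) c
      = c + (pvNE s).length := by
  induction s with
  | nil => intro c; simp [pvNE]
  | cons d t ih =>
    intro c
    simp only [List.foldl]
    by_cases h : d = EMPTY_VALUE
    · rw [if_neg (by simp [h]), ih c, pvNE_cons_neg h]
    · rw [if_pos h, ih (c + 1), pvNE_cons_pos h]
      simp; omega

theorem pv_filter_add (acc : List String) (d : String) :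
    List.filter (fun y => !y == EMPTY_VALUE) (PySem.Set.add acc d)
      = if d = EMPTY_VALUE then List.filter (fun y => !y == EMPTY_VALUE) acc
        else PySem.Set.add (List.filter (fun y => !y == EMPTY_VALUE) acc) d := by
  by_cases h : d = EMPTY_VALUE
  · subst h
    by_cases hc : EMPTY_VALUE ∈ acc
    · rw [pv_add_mem hc, if_pos rfl]
    · rw [pv_add_not_mem hc, if_pos rfl, List.filter_append]; simp
  · rw [if_neg h]
    by_cases hc : d ∈ acc
    · rw [pv_add_mem hc, pv_add_mem (by simp [List.mem_filter, hc, h])]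
    · rw [pv_add_not_mem hc,
        pv_add_not_mem (fun hm => hc (List.mem_of_mem_filter hm)),
        List.filter_append]
      simp [h]

-- discarding EMPTY_VALUE from set(s) is the set of the non-empty entries
theorem pv_discard_foldl (s : List String) : ∀ (acc : List String),
    List.filter (fun y => !y == EMPTY_VALUE) (s.foldl PySem.Set.add acc)
      = (pvNE s).foldl PySem.Set.add (List.filter (fun y => !y == EMPTY_VALUE) acc) := by
  induction s with
  | nil => intro acc; simp [pvNE]
  | cons d t ih =>
    intro acc
    simp only [List.foldl]
    rw [ih (PySem.Set.add acc d), pv_filter_add]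
    by_cases h : d = EMPTY_VALUE
    · rw [if_pos h, pvNE_cons_neg h]
    · rw [if_neg h, pvNE_cons_pos h]
      simp [List.foldl]

theorem pv_discard_ofList (s : List String) :
    PySem.Set.discard (PySem.Set.ofList s) EMPTY_VALUE = PySem.Set.ofList (pvNE s) := by
  simpa [PySem.Set.discard, PySem.Set.ofList, PySem.Set.empty] using pv_discard_foldl s []

theorem pv_len_le (t : List String) : ∀ (acc : List String),
    (t.foldl PySem.Set.add acc).length ≤ acc.length + t.length := by
  induction t with
  | nil => intro acc; simp
  | cons x t ih =>
    intro acc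
    simp only [List.foldl, List.length_cons]
    have h1 := ih (PySem.Set.add acc x)
    by_cases h : x ∈ acc
    · rw [pv_add_mem h] at h1 ⊢; omega
    · rw [pv_add_not_mem h] at h1 ⊢
      simp only [List.length_append, List.length_cons, List.length_nil] at h1
      omega

-- length of foldl add is the full length iff the list is duplicate-free and disjoint from acc
theorem pv_len_eq_iff (t : List String) : ∀ (acc : List String),
    ((t.foldl PySem.Set.add acc).length = acc.length + t.length)
      ↔ (t.Nodup ∧ ∀ x ∈ t, x ∉ acc) := by
  induction t with
  | nil => intro acc; simp
  | cons x t ih =>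
    intro acc
    simp only [List.foldl, List.length_cons]
    by_cases h : x ∈ acc
    · rw [pv_add_mem h]
      have hle := pv_len_le t acc
      constructor
      · intro he; omega
      · rintro ⟨-, hall⟩; exact absurd h (hall x (by simp))
    · rw [pv_add_not_mem h]
      have hiff := ih (acc ++ [x])
      rw [show acc.length + (t.length + 1) = (acc ++ [x]).length + t.length by
        simp; omega]
      rw [hiff]
      constructor
      · rintro ⟨hn, hall⟩
        refine ⟨List.nodup_cons.mpr ⟨fun hm =>
          absurd (List.mem_append.mpr (Or.inr (by simp))) (hall x hm), hn⟩,
          fun y hy hya => ?_⟩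
        rcases List.mem_cons.mp hy with rfl | hy'
        · exact h hya
        · exact hall y hy' (List.mem_append.mpr (Or.inl hya))
      · rintro ⟨hn, hall⟩
        refine ⟨(List.nodup_cons.mp hn).2, fun y hy hya => ?_⟩
        rcases List.mem_append.mp hya with h1 | h1
        · exact hall y (List.mem_cons_of_mem x hy) h1
        · have hyx : y = x := by simpa using h1
          subst hyx
          exact (List.nodup_cons.mp hn).1 hy

theorem pv_ofList_len_iff (t : List String) :
    ((PySem.Set.ofList t).length = t.length) ↔ t.Nodup := by
  have := pv_len_eq_iff t []
  simpa [PySem.Set.ofList, PySem.Set.empty] using this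

-- B's loop returns true iff the remaining non-empty entries are duplicate-free and unseen
theorem pv_loop (s : List String) : ∀ (seen : List String),
    check_valid_section_alt_loop seen s
      = decide ((pvNE s).Nodup ∧ ∀ x ∈ pvNE s, x ∉ seen) := by
  induction s with
  | nil => intro seen; simp [check_valid_section_alt_loop, pvNE]
  | cons d t ih =>
    intro seen
    by_cases h : d = EMPTY_VALUE
    · rw [pvNE_cons_neg h]
      simp only [check_valid_section_alt_loop, if_pos h]
      exact ih seen
    · rw [pvNE_cons_pos h]
      simp only [check_valid_section_alt_loop, if_neg h, PySem.Set.contains]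
      by_cases hc : d ∈ seen
      · rw [if_pos (by simpa using hc)]
        have : ¬ ((d :: pvNE t).Nodup ∧ ∀ x ∈ d :: pvNE t, x ∉ seen) := by
          rintro ⟨-, hall⟩; exact hall d (by simp) hc
        exact (decide_eq_false this).symm
      · rw [if_neg (by simpa using hc), pv_add_not_mem hc, ih (seen ++ [d])]
        rw [decide_eq_decide]
        constructor
        · rintro ⟨hn, hall⟩
          refine ⟨List.nodup_cons.mpr ⟨fun hm =>
            hall d hm (List.mem_append.mpr (Or.inr (by simp))), hn⟩,
            fun y hy hya => ?_⟩
          rcases List.mem_cons.mp hy with rfl | hy'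
          · exact hc hya
          · exact hall y hy' (List.mem_append.mpr (Or.inl hya))
        · rintro ⟨hn, hall⟩
          refine ⟨(List.nodup_cons.mp hn).2, fun y hy hya => ?_⟩
          rcases List.mem_append.mp hya with h1 | h1
          · exact hall y (List.mem_cons_of_mem d hy) h1
          · have hyd : y = d := by simpa using h1
            subst hyd
            exact (List.nodup_cons.mp hn).1 hy

theorem pv_a_char (s : List String) :
    check_valid_section s = decide ((pvNE s).Nodup) := by
  simp only [check_valid_section, pv_discard_ofList, PySem.Set.len, pv_count]
  have h := pv_ofList_len_iff (pvNE s)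
  by_cases hn : (pvNE s).Nodup
  · simp [hn, h.mpr hn]
  · have hne : (PySem.Set.ofList (pvNE s)).length ≠ (pvNE s).length := fun he => hn (h.mp he)
    simp [hn]
    omega

-- ===== VERDICT (by name: the statement is the Claim_ definition above) =====
theorem check_valid_section_spec : Claim_equal_check_valid_section := by
  intro s _
  unfold Spec_check_valid_section check_valid_section_alt
  rw [pv_a_char, pv_loop]
  simp [PySem.Set.empty]
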